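-- pv_equiv track=rewrite | github.com/lllDavid/Python | generator/usernames.py | generate_all_usernames_all_combos
-- ===== SOURCE A (Python) =====
-- from itertools import product, permutations
--
-- def insert_separators_in_word(word, separators):
--     if len(word) == 1:
--         return [word]
--     slots = len(word) - 1
--     sep_choices = list(product(separators, repeat=slots))
--     results = []
--     for seps in sep_choices:
--         pieces = []
--         for i in range(len(word)):
--             pieces.append(word[i])
--             if i < slots:
--                 pieces.append(seps[i])
--         results.append(''.join(pieces))
--     return results
--
-- def generate_all_usernames_all_combos(full_name):
--     separators = ["", "_", "-", "."]
--     parts = full_name.lower().split()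
--     parts_len = len(parts)
--     all_usernames = set()
--     expanded_parts = []
--     for p in parts:
--         variants = insert_separators_in_word(p, separators)
--         variants.append(p[0])
--         expanded_parts.append(variants)
--     perms = permutations(range(parts_len))
--     for perm in perms:
--         permuted_expanded_parts = [expanded_parts[i] for i in perm]
--         for chosen_parts in product(*permuted_expanded_parts):
--             for part_seps in product(separators, repeat=parts_len-1):
--                 username_pieces = []
--                 for i, part_str in enumerate(chosen_parts):
--                     username_pieces.append(part_str)
--                     if i < parts_len-1:
--                         username_pieces.append(part_seps[i])
--                 username = ''.join(username_pieces)
--                 all_usernames.add(username)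
--     return sorted(all_usernames)
-- ===== SOURCE B (Python) =====
-- def generate_all_usernames_all_combos(full_name):
--     separators = ["", "_", "-", "."]
--     parts = full_name.lower().split()
--
--     def word_variants(w):
--         # all ways to put one separator (possibly '') between adjacent characters,
--         # built by extending every prefix with the next character
--         variants = [w[:1]]
--         for ch in w[1:]:
--             variants = [v + s + ch for v in variants for s in separators]
--         return variants
--
--     def emit(pools):
--         # yield every username: each pool used exactly once, in every order,
--         # with a separator between consecutive parts
--         if len(pools) == 1:
--             yield from pools[0]
--             return
--         for i in range(len(pools)):
--             rest = pools[:i] + pools[i + 1:]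
--             for v in pools[i]:
--                 for s in separators:
--                     for t in emit(rest):
--                         yield v + s + t
--
--     pools = [word_variants(p) + [p[0]] for p in parts]
--     return sorted(set(emit(pools)))
-- ===== Notes on version B (the rewrite author's own statement) =====
-- stated objective: alternative
-- what changed: Replaces the itertools.product/permutations enumeration with direct construction: separator-inserted word variants are built by iteratively extending prefixes, and full usernames come from a recursive generator that picks each remaining part (variant plus following separator) in turn, feeding one set; A materialises index permutations and cartesian products instead.
import Mathlib
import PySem

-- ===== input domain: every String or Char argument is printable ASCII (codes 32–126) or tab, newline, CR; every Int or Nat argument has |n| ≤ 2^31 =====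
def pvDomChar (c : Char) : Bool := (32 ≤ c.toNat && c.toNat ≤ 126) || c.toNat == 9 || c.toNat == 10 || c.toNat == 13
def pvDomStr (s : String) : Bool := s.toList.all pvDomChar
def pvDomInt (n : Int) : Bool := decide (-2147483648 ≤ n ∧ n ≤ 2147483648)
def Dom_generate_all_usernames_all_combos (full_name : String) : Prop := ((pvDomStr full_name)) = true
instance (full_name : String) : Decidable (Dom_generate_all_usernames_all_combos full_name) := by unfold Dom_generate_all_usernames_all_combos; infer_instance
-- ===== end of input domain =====

-- B replaces A's itertools.product/permutations enumeration: separator insertions are built by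
-- iteratively extending prefixes, and usernames by a recursive generator that picks each remaining
-- part in turn; same sorted-set result on every input where A returns (Pre_ excludes the no-word
-- inputs, on which A raises ValueError and B returns []).

-- ===== PORT A =====

-- itertools.product(xs, repeat=n): first coordinate varies slowest
def pvProdRep (xs : List String) : Nat → List (List String)
  | 0 => [[]]
  | n+1 => xs.flatMap (fun x => (pvProdRep xs n).map (x :: ·))

-- itertools.product(*pools)
def pvProdLists : List (List String) → List (List String)
  | [] => [[]]
  | l :: ls => l.flatMap (fun x => (pvProdLists ls).map (x :: ·))

-- the `pieces` loop of insert_separators_in_word: word[i], then seps[i] while i < slots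
-- (structural recursion over the same two lists; seps always has exactly len(word)-1 entries)
def pvPiecesC : List Char → List String → List String
  | [], _ => []
  | [c], _ => [String.ofList [c]]
  | c :: cs, [] => [String.ofList [c]]
  | c :: cs, s :: ss => String.ofList [c] :: s :: pvPiecesC cs ss

-- the `username_pieces` loop: chosen_parts[i], then part_seps[i] while i < parts_len-1
-- (chosen_parts always has parts_len entries, part_seps has parts_len-1)
def pvPieces : List String → List String → List String
  | [], _ => []
  | [p], _ => [p]
  | p :: ps, [] => [p]
  | p :: ps, s :: ss => p :: s :: pvPieces ps ss

def insert_separators_in_word (word : String) (separators : List String) : List String :=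
  if PySem.Str.len word = 1 then [word]
  else
    let slots := word.toList.length - 1
    (pvProdRep separators slots).foldl
      (fun results seps => results ++ [PySem.Str.join "" (pvPiecesC word.toList seps)]) []

def generate_all_usernames_all_combos (full_name : String) : List String :=
  let separators : List String := ["", "_", "-", "."]
  let parts := PySem.Str.split₀ (PySem.Str.lower full_name)
  let parts_len := parts.length
  -- p[0] ported as the first character; split() never yields an empty word, so the take-1 guard is total only
  let expanded_parts := parts.foldl
    (fun acc p => acc ++ [insert_separators_in_word p separators ++ [String.ofList (p.toList.take 1)]]) []
  let perms := PySem.List.permutations (PySem.List.pyRange 0 (parts_len : Int)) parts_len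
  let all_usernames := perms.foldl (fun all perm =>
      let permuted := perm.map (fun i => PySem.List.pyGetD expanded_parts i [])
      (pvProdLists permuted).foldl (fun all chosen =>
        (pvProdRep separators (parts_len - 1)).foldl (fun all part_seps =>
          PySem.Set.add all (PySem.Str.join "" (pvPieces chosen part_seps))) all) all)
    PySem.Set.empty
  PySem.List.sorted all_usernames (fun x => x) false

-- ===== PORT B =====

-- word_variants: extend every prefix with the next character and a separator
def pvWordVariants (separators : List String) (w : List Char) : List String :=
  (w.drop 1).foldl
    (fun variants ch =>
      variants.flatMap (fun v => separators.map (fun s => v ++ s ++ String.ofList [ch])))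
    [String.ofList (w.take 1)]

-- emit: every username, each pool used exactly once, in every order, a separator between parts
-- (the generator is ported as the list of its yields, in order; pools[:i] + pools[i+1:] is
-- take i ++ drop (i+1); fuel is a structural-termination device only, called with
-- fuel = pools.length — each recursive call removes one pool, so the 0-fuel arm is unreachable)
def pvEmit (separators : List String) : Nat → List (List String) → List String
  | _, [l] => l
  | 0, _ => []
  | fuel+1, pools =>
    (List.range pools.length).flatMap (fun i =>
      let rest := pools.take i ++ pools.drop (i+1)
      (pools.getD i []).flatMap (fun v =>
        separators.flatMap (fun s => (pvEmit separators fuel rest).map (fun t => v ++ s ++ t))))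

def generate_all_usernames_all_combos_alt (full_name : String) : List String :=
  let separators : List String := ["", "_", "-", "."]
  let parts := PySem.Str.split₀ (PySem.Str.lower full_name)
  let pools := parts.map
    (fun p => pvWordVariants separators p.toList ++ [String.ofList (p.toList.take 1)])
  PySem.List.sorted (PySem.Set.ofList (pvEmit separators pools.length pools)) (fun x => x) false

-- ===== PRECONDITION & SPEC =====
-- Pre_ excludes exactly the inputs with no words (whitespace-only / empty name), on which
-- the Python A raises ValueError (product(..., repeat=-1)).
def Pre_generate_all_usernames_all_combos (full_name : String) : Prop :=
  PySem.Str.split₀ (PySem.Str.lower full_name) ≠ []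
instance (full_name : String) : Decidable (Pre_generate_all_usernames_all_combos full_name) := by
  unfold Pre_generate_all_usernames_all_combos; infer_instance

def pvWitness_generate_all_usernames_all_combos : String := "Jo Li"

def Spec_generate_all_usernames_all_combos (full_name : String) (out : List String) : Prop := out = generate_all_usernames_all_combos_alt full_name
instance (full_name : String) (out : List String) : Decidable (Spec_generate_all_usernames_all_combos full_name out) := by unfold Spec_generate_all_usernames_all_combos; infer_instance

-- ===== CLAIM (what is proved, stated in full; the proofs are below) =====
def Claim_equal_generate_all_usernames_all_combos : Prop := ∀ (full_name : String), Dom_generate_all_usernames_all_combos full_name → Pre_generate_all_usernames_all_combos full_name → Spec_generate_all_usernames_all_combos full_name (generate_all_usernames_all_combos full_name)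


-- ===== LEMMAS AND PROOFS =====

-- canonical flatMap form of A's triple set-building loop (proof helper only)
def pvEnumA (seps : List String) (pools : List (List String)) : List String :=
  (PySem.List.permutations pools pools.length).flatMap (fun sel =>
    (pvProdLists sel).flatMap (fun chosen =>
      (pvProdRep seps (pools.length - 1)).map
        (fun ps => PySem.Str.join "" (pvPieces chosen ps))))

lemma pvChars_join_nil_cons (p : List Char) (rest : List (List Char)) :
    PySem.Chars.join [] (p :: rest) = p ++ PySem.Chars.join [] rest := by
  cases rest with
  | nil => simp [PySem.Chars.join_singleton, PySem.Chars.join_nil]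
  | cons q qs => rw [PySem.Chars.join_cons_cons]; simp

lemma pvJoin_single (v : String) (ss : List String) :
    PySem.Str.join "" (pvPieces [v] ss) = v := by
  apply String.toList_inj.mp
  cases ss <;> simp [pvPieces, PySem.Str.toList_join, PySem.Chars.join_singleton]

lemma pvJoin_cons (v c : String) (cs : List String) (s : String) (ss : List String) :
    PySem.Str.join "" (pvPieces (v :: c :: cs) (s :: ss))
      = v ++ s ++ PySem.Str.join "" (pvPieces (c :: cs) ss) := by
  apply String.toList_inj.mp
  simp only [pvPieces, PySem.Str.toList_join, String.toList_append, List.map_cons]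
  rw [show ("" : String).toList = [] from rfl, pvChars_join_nil_cons, pvChars_join_nil_cons]
  simp

lemma pvJoinC_single (c : Char) (ss : List String) :
    PySem.Str.join "" (pvPiecesC [c] ss) = String.ofList [c] := by
  apply String.toList_inj.mp
  cases ss <;> simp [pvPiecesC, PySem.Str.toList_join, PySem.Chars.join_singleton]

lemma pvJoinC_cons (c d : Char) (cs : List Char) (s : String) (ss : List String) :
    PySem.Str.join "" (pvPiecesC (c :: d :: cs) (s :: ss))
      = String.ofList [c] ++ s ++ PySem.Str.join "" (pvPiecesC (d :: cs) ss) := by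
  apply String.toList_inj.mp
  simp only [pvPiecesC, PySem.Str.toList_join, String.toList_append, List.map_cons]
  rw [show ("" : String).toList = [] from rfl, pvChars_join_nil_cons, pvChars_join_nil_cons]
  simp

lemma pvLength_mem_prodRep (seps : List String) :
    ∀ (n : Nat) (ss : List String), ss ∈ pvProdRep seps n → ss.length = n := by
  intro n
  induction n with
  | zero => intro ss h; simp [pvProdRep] at h; simp [h]
  | succ n ih =>
    intro ss h
    simp only [pvProdRep, List.mem_flatMap, List.mem_map] at h
    obtain ⟨x, _, ss', hss', rfl⟩ := h
    simp [ih ss' hss']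

lemma pvProdRep_snoc (seps : List String) :
    ∀ (n : Nat), pvProdRep seps (n+1)
      = (pvProdRep seps n).flatMap (fun ss => seps.map (fun s => ss ++ [s])) := by
  intro n
  induction n with
  | zero =>
    show seps.flatMap (fun x => ([[]] : List (List String)).map (x :: ·)) = _
    simp [← List.map_eq_flatMap, pvProdRep]
  | succ n ih =>
    conv_rhs => rw [show pvProdRep seps (n+1)
          = seps.flatMap (fun x => (pvProdRep seps n).map (x :: ·)) from rfl]
    rw [show pvProdRep seps (n+2)
          = seps.flatMap (fun x => (pvProdRep seps (n+1)).map (x :: ·)) from rfl, ih]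
    simp [List.flatMap_assoc, List.map_flatMap, List.flatMap_map, List.map_map,
      Function.comp_def, List.cons_append]

lemma pvJoinC_snoc (d : Char) (s : String) :
    ∀ (cs : List Char) (c : Char) (ss : List String), ss.length = cs.length →
      PySem.Str.join "" (pvPiecesC (c :: (cs ++ [d])) (ss ++ [s]))
        = PySem.Str.join "" (pvPiecesC (c :: cs) ss) ++ s ++ String.ofList [d] := by
  intro cs
  induction cs with
  | nil =>
    intro c ss hlen
    rw [List.length_nil, List.length_eq_zero_iff] at hlen
    subst hlen
    apply String.toList_inj.mp
    simp [pvPiecesC, PySem.Str.toList_join, PySem.Chars.join_singleton,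
      pvChars_join_nil_cons, String.toList_append]
  | cons e cs ih =>
    intro c ss hlen
    obtain ⟨s0, ss', rfl⟩ : ∃ s0 ss', ss = s0 :: ss' := by
      cases ss with
      | nil => simp at hlen
      | cons a b => exact ⟨a, b, rfl⟩
    simp only [List.length_cons, Nat.add_right_cancel_iff] at hlen
    rw [show (e :: cs) ++ [d] = e :: (cs ++ [d]) from rfl,
        show (s0 :: ss') ++ [s] = s0 :: (ss' ++ [s]) from rfl,
        pvJoinC_cons, ih e ss' hlen, pvJoinC_cons]
    apply String.toList_inj.mp
    simp [String.toList_append]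

lemma pvProdRep_map_join (seps : List String) :
    ∀ (cs : List Char) (c : Char),
      (pvProdRep seps cs.length).map (fun ss => PySem.Str.join "" (pvPiecesC (c :: cs) ss))
        = pvWordVariants seps (c :: cs) := by
  intro cs
  induction cs using List.reverseRecOn with
  | nil => intro c; simp [pvProdRep, pvWordVariants, pvJoinC_single]
  | append_singleton cs' d ih =>
    intro c
    rw [show pvWordVariants seps (c :: (cs' ++ [d]))
          = (cs' ++ [d]).foldl
              (fun variants ch =>
                variants.flatMap (fun v => seps.map (fun s => v ++ s ++ String.ofList [ch])))
              [String.ofList [c]] from rfl]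
    rw [List.foldl_append]
    rw [show (cs').foldl
          (fun variants ch =>
            variants.flatMap (fun v => seps.map (fun s => v ++ s ++ String.ofList [ch])))
          [String.ofList [c]] = pvWordVariants seps (c :: cs') from rfl]
    rw [← ih c]
    rw [List.length_append, List.length_singleton, pvProdRep_snoc]
    rw [List.map_flatMap]
    simp only [List.foldl_cons, List.foldl_nil, List.flatMap_map, List.map_map,
      Function.comp_def]
    refine List.flatMap_congr (fun ss hss => ?_)
    have hl := pvLength_mem_prodRep seps cs'.length ss hss
    refine List.map_congr_left (fun s' _ => ?_)
    exact pvJoinC_snoc d s' cs' c ss hl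

lemma pvVariants_eq (seps : List String) (w : String) :
    insert_separators_in_word w seps = pvWordVariants seps w.toList := by
  rcases hw : w.toList with _ | ⟨c, _ | ⟨d, cs⟩⟩
  · have hlen : ¬ PySem.Str.len w = 1 := by simp [PySem.Str.len_eq, hw]
    simp only [insert_separators_in_word, hw, if_neg hlen]
    simp [pvProdRep, pvPiecesC, pvWordVariants, PySem.Str.join, PySem.Chars.join_nil]
  · have hlen : PySem.Str.len w = 1 := by simp [PySem.Str.len_eq, hw]
    simp only [insert_separators_in_word, if_pos hlen]
    rw [show w = String.ofList w.toList from String.ofList_toList.symm, hw]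
    rfl
  · have hlen : ¬ PySem.Str.len w = 1 := by
      simp [PySem.Str.len_eq, hw]
      omega
    simp only [insert_separators_in_word, hw, if_neg hlen]
    rw [PySem.List.foldl_append_singleton_eq_map
      (fun seps' => PySem.Str.join "" (pvPiecesC (c :: d :: cs) seps'))]
    rw [List.nil_append]
    exact pvProdRep_map_join seps (d :: cs) c

lemma pvFoldl_update_flatMap {α β : Type} [BEq α] (l : List β) (m : β → List α) (s : List α) :
    l.foldl (fun acc x => PySem.Set.update acc (m x)) s = PySem.Set.update s (l.flatMap m) := by
  induction l generalizing s with
  | nil => simp [PySem.Set.update]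
  | cons x xs ih => simp only [List.foldl_cons, List.flatMap_cons, ih, PySem.Set.update_append]

lemma pvPermutations_map {α β : Type} (f : α → β) :
    ∀ (r : Nat) (xs : List α),
      PySem.List.permutations (xs.map f) r = (PySem.List.permutations xs r).map (List.map f) := by
  intro r
  induction r with
  | zero => intro xs; simp [PySem.List.permutations_zero]
  | succ r ih =>
    intro xs
    rw [PySem.List.permutations_succ, PySem.List.permutations_succ]
    rw [List.map_flatMap, List.length_map]
    refine List.flatMap_congr (fun i hi => ?_)
    rw [List.getElem?_map]
    cases h : xs[i]? with
    | none => rfl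
    | some x =>
      simp only [Option.map_some]
      rw [List.eraseIdx_map, ih]
      simp [List.map_map, Function.comp_def]

lemma pvLength_mem_prodLists : ∀ (ls : List (List String)) (c : List String),
    c ∈ pvProdLists ls → c.length = ls.length := by
  intro ls
  induction ls with
  | nil => intro c hc; simp [pvProdLists] at hc; simp [hc]
  | cons l ls ih =>
    intro c hc
    simp only [pvProdLists, List.mem_flatMap, List.mem_map] at hc
    obtain ⟨x, _, c', hc', rfl⟩ := hc
    simp [ih c' hc']

lemma pvMem_permutations_succ (xs : List (List String)) (r : Nat) (sel : List (List String)) :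
    sel ∈ PySem.List.permutations xs (r+1) ↔
      ∃ i < xs.length, ∃ p ∈ PySem.List.permutations (xs.eraseIdx i) r,
        sel = xs.getD i [] :: p := by
  rw [PySem.List.permutations_succ]
  simp only [List.mem_flatMap, List.mem_range]
  constructor
  · rintro ⟨i, hi, hmem⟩
    rw [List.getElem?_eq_getElem hi] at hmem
    simp only [List.mem_map] at hmem
    obtain ⟨pp, hpp, rfl⟩ := hmem
    exact ⟨i, hi, pp, hpp, by rw [List.getD_eq_getElem _ _ hi]⟩
  · rintro ⟨i, hi, pp, hpp, rfl⟩
    refine ⟨i, hi, ?_⟩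
    rw [List.getElem?_eq_getElem hi]
    simp only [List.mem_map]
    exact ⟨pp, hpp, by rw [List.getD_eq_getElem _ _ hi]⟩

lemma pvLen_eraseIdx2 (p q : List String) (ps' : List (List String)) (i : Nat)
    (hi : i < (p :: q :: ps').length) :
    ((p :: q :: ps').eraseIdx i).length = ps'.length + 1 := by
  rw [List.length_eraseIdx]
  simp only [hi, if_pos]
  simp

lemma pvMem_enumA_succ (seps : List String) (p q : List String) (ps' : List (List String))
    (x : String) :
    x ∈ pvEnumA seps (p :: q :: ps') ↔
      ∃ i < (p :: q :: ps').length, ∃ v ∈ (p :: q :: ps').getD i [],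
        ∃ s ∈ seps, ∃ y ∈ pvEnumA seps ((p :: q :: ps').eraseIdx i), x = v ++ s ++ y := by
  constructor
  · intro hx
    simp only [pvEnumA, List.mem_flatMap, List.mem_map] at hx
    obtain ⟨sel, hsel, hx⟩ := hx
    rw [show (p :: q :: ps').length = ps'.length + 1 + 1 from rfl,
        pvMem_permutations_succ] at hsel
    obtain ⟨i, hi, perm', hperm', rfl⟩ := hsel
    have hlene : ((p :: q :: ps').eraseIdx i).length = ps'.length + 1 :=
      pvLen_eraseIdx2 p q ps' i hi
    have hpl : perm'.length = ps'.length + 1 := by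
      have h2 := PySem.List.perm_of_mem_permutations (p := perm') (xs := (p :: q :: ps').eraseIdx i)
        (by rw [hlene]; exact hperm')
      rw [h2.length_eq, hlene]
    rw [show (p :: q :: ps').length - 1 = ps'.length + 1 from rfl] at hx
    rw [show pvProdLists ((p :: q :: ps').getD i [] :: perm')
          = ((p :: q :: ps').getD i []).flatMap (fun v => (pvProdLists perm').map (v :: ·))
        from rfl] at hx
    rw [show pvProdRep seps (ps'.length + 1)
          = seps.flatMap (fun s => (pvProdRep seps ps'.length).map (s :: ·)) from rfl] at hx
    simp only [List.mem_flatMap, List.mem_map] at hx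
    obtain ⟨chosen, ⟨v, hv, c', hc', rfl⟩, ps_, ⟨s, hs, ss, hss, rfl⟩, hxeq⟩ := hx
    have hc'len : c'.length = ps'.length + 1 := by
      rw [pvLength_mem_prodLists _ _ hc', hpl]
    obtain ⟨c0, cs, rfl⟩ : ∃ c0 cs, c' = c0 :: cs := by
      cases c' with
      | nil => simp at hc'len
      | cons a b => exact ⟨a, b, rfl⟩
    refine ⟨i, hi, v, hv, s, hs, PySem.Str.join "" (pvPieces (c0 :: cs) ss), ?_,
      hxeq.symm.trans (pvJoin_cons v c0 cs s ss)⟩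
    simp only [pvEnumA, List.mem_flatMap, List.mem_map, hlene]
    refine ⟨perm', hperm', c0 :: cs, hc', ss, ?_, rfl⟩
    simpa using hss
  · rintro ⟨i, hi, v, hv, s, hs, y, hy, rfl⟩
    have hlene : ((p :: q :: ps').eraseIdx i).length = ps'.length + 1 :=
      pvLen_eraseIdx2 p q ps' i hi
    simp only [pvEnumA, List.mem_flatMap, List.mem_map, hlene] at hy
    obtain ⟨perm', hperm', c', hc', ss, hss, rfl⟩ := hy
    have hpl : perm'.length = ps'.length + 1 := by
      have h2 := PySem.List.perm_of_mem_permutations (p := perm') (xs := (p :: q :: ps').eraseIdx i)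
        (by rw [hlene]; exact hperm')
      rw [h2.length_eq, hlene]
    have hc'len : c'.length = ps'.length + 1 := by
      rw [pvLength_mem_prodLists _ _ hc', hpl]
    obtain ⟨c0, cs, rfl⟩ : ∃ c0 cs, c' = c0 :: cs := by
      cases c' with
      | nil => simp at hc'len
      | cons a b => exact ⟨a, b, rfl⟩
    simp only [pvEnumA, List.mem_flatMap, List.mem_map]
    refine ⟨(p :: q :: ps').getD i [] :: perm', ?_, v :: c0 :: cs, ?_, s :: ss, ?_, ?_⟩
    · rw [show (p :: q :: ps').length = ps'.length + 1 + 1 from rfl,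
          pvMem_permutations_succ]
      exact ⟨i, hi, perm', hperm', rfl⟩
    · rw [show pvProdLists ((p :: q :: ps').getD i [] :: perm')
            = ((p :: q :: ps').getD i []).flatMap (fun v => (pvProdLists perm').map (v :: ·))
          from rfl]
      simp only [List.mem_flatMap, List.mem_map]
      exact ⟨v, hv, c0 :: cs, hc', rfl⟩
    · rw [show (p :: q :: ps').length - 1 = ps'.length + 1 from rfl]
      rw [show pvProdRep seps (ps'.length + 1)
            = seps.flatMap (fun s => (pvProdRep seps ps'.length).map (s :: ·)) from rfl]
      simp only [List.mem_flatMap, List.mem_map]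
      exact ⟨s, hs, ss, by simpa using hss, rfl⟩
    · exact pvJoin_cons v c0 cs s ss

lemma pvEmit_cons2 (seps : List String) (fuel : Nat) (p q : List String)
    (ps' : List (List String)) :
    pvEmit seps (fuel+1) (p :: q :: ps')
      = (List.range (p :: q :: ps').length).flatMap (fun i =>
          let rest := (p :: q :: ps').take i ++ (p :: q :: ps').drop (i+1)
          ((p :: q :: ps').getD i []).flatMap (fun v =>
            seps.flatMap (fun s => (pvEmit seps fuel rest).map (fun t => v ++ s ++ t)))) := rfl

lemma pvMem_emit_succ (seps : List String) (p q : List String) (ps' : List (List String))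
    (x : String) :
    x ∈ pvEmit seps (p :: q :: ps').length (p :: q :: ps') ↔
      ∃ i < (p :: q :: ps').length, ∃ v ∈ (p :: q :: ps').getD i [],
        ∃ s ∈ seps, ∃ y ∈ pvEmit seps ((p :: q :: ps').eraseIdx i).length
          ((p :: q :: ps').eraseIdx i), x = v ++ s ++ y := by
  rw [show (p :: q :: ps').length = ps'.length + 1 + 1 from rfl, pvEmit_cons2]
  simp only [List.mem_flatMap, List.mem_range, List.mem_map]
  refine exists_congr (fun i => ?_)
  constructor
  · rintro ⟨hi, v, hv, s, hs, t, ht, rfl⟩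
    have hi' : i < (p :: q :: ps').length := hi
    refine ⟨hi', v, hv, s, hs, t, ?_, rfl⟩
    rw [pvLen_eraseIdx2 p q ps' i hi', List.eraseIdx_eq_take_drop_succ]
    exact ht
  · rintro ⟨hi, v, hv, s, hs, t, ht, rfl⟩
    rw [pvLen_eraseIdx2 p q ps' i hi, List.eraseIdx_eq_take_drop_succ] at ht
    exact ⟨hi, v, hv, s, hs, t, ht, rfl⟩

lemma pvMain_mem (seps : List String) :
    ∀ (n : Nat) (pools : List (List String)), pools.length = n → pools ≠ [] →
      ∀ x, (x ∈ pvEnumA seps pools ↔ x ∈ pvEmit seps pools.length pools) := by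
  intro n
  induction n using Nat.strong_induction_on with
  | _ n ih =>
    rintro pools hlen hne x
    match pools, hlen with
    | [], _ => exact absurd rfl hne
    | [l], _ =>
      rw [show pvEmit seps [l].length [l] = l from rfl]
      have h1 : PySem.List.permutations [l] 1 = [[l]] := rfl
      simp [pvEnumA, h1, pvProdLists, pvProdRep, pvJoin_single]
    | p :: q :: ps', hlen =>
      rw [pvMem_enumA_succ, pvMem_emit_succ]
      have hn : ps'.length + 2 = n := by simpa using hlen
      refine exists_congr (fun i => and_congr_right (fun hi => ?_))
      refine exists_congr (fun v => and_congr_right (fun hv => ?_))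
      refine exists_congr (fun s => and_congr_right (fun hs => ?_))
      refine exists_congr (fun y => and_congr_left (fun _ => ?_))
      have hlene : ((p :: q :: ps').eraseIdx i).length = ps'.length + 1 :=
        pvLen_eraseIdx2 p q ps' i hi
      have hnee : (p :: q :: ps').eraseIdx i ≠ [] := by
        intro h; rw [h] at hlene; simp at hlene
      exact ih (ps'.length + 1) (by omega) ((p :: q :: ps').eraseIdx i) hlene hnee y

-- ===== VERDICT (by name: the statement is the Claim_ definition above) =====
theorem generate_all_usernames_all_combos_spec : Claim_equal_generate_all_usernames_all_combos := by
  intro fn hDom hPre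
  unfold Pre_generate_all_usernames_all_combos at hPre
  unfold Spec_generate_all_usernames_all_combos
  simp only [generate_all_usernames_all_combos, generate_all_usernames_all_combos_alt]
  rw [PySem.List.foldl_append_singleton_eq_map
    (fun p => insert_separators_in_word p ["", "_", "-", "."] ++ [String.ofList (p.toList.take 1)])]
  rw [List.nil_append]
  simp only [pvVariants_eq]
  set S : List String := ["", "_", "-", "."] with hS
  set parts : List String := PySem.Str.split₀ (PySem.Str.lower fn) with hparts
  set pools : List (List String) :=
    parts.map (fun p => pvWordVariants S p.toList ++ [String.ofList (List.take 1 p.toList)])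
    with hpools
  simp only [← PySem.Set.update_map_eq_foldl_add]
  simp only [pvFoldl_update_flatMap]
  rw [show PySem.Set.empty = ([] : List String) from rfl]
  rw [PySem.Set.update_nil_left]
  have hlenp : pools.length = parts.length := by simp [hpools]
  have hne : pools ≠ [] := by
    rw [hpools]
    intro h
    exact hPre (List.map_eq_nil_iff.mp h)
  apply PySem.List.sorted_eq_sorted_of_perm _ _ _ (fun a b h => h)
  refine (List.perm_ext_iff_of_nodup (PySem.Set.nodup_ofList _) (PySem.Set.nodup_ofList _)).mpr ?_
  intro a
  rw [PySem.Set.mem_ofList, PySem.Set.mem_ofList]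
  have hperm : (PySem.List.permutations (PySem.List.pyRange 0 (parts.length : Int))
        parts.length).map (List.map (fun i => PySem.List.pyGetD pools i []))
      = PySem.List.permutations pools pools.length := by
    rw [← pvPermutations_map]
    rw [show ((parts.length : Int)) = PySem.List.len pools from by
      simp [PySem.List.len, hlenp]]
    rw [PySem.List.map_pyGetD_pyRange_zero]
    rw [hlenp]
  rw [← pvMain_mem S pools.length pools rfl hne a]
  simp only [pvEnumA, List.mem_flatMap]
  constructor
  · rintro ⟨perm, hpm, ha⟩
    refine ⟨perm.map (fun i => PySem.List.pyGetD pools i []), ?_, ?_⟩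
    · rw [← hperm]
      exact List.mem_map_of_mem hpm
    · simpa [hlenp] using ha
  · rintro ⟨sel, hsel, ha⟩
    rw [← hperm] at hsel
    obtain ⟨perm, hpm, rfl⟩ := List.mem_map.mp hsel
    exact ⟨perm, hpm, by simpa [hlenp] using ha⟩
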